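-- pv_equiv track=rewrite | github.com/xinofekuator/university-projects | Python/homology_groups/GruposHomología.py | dividirEnListas
-- ===== SOURCE A (Python) =====
-- def dividirEnListas(lista):
--    resultado=[]
--    tam=len(lista)
--    for i in range(tam):
--       listaAux=[]
--       for j in range(tam-1):
--          listaAux.append(lista[(i+j)%tam])
--       resultado.append(listaAux)
--    #En caso de estar vacía termina porque no entra en el caso recursivo
--    return  list(sorted(i) for i in resultado)
-- ===== SOURCE B (Python) =====
-- def dividirEnListas(lista):
--     n = len(lista)
--     base = sorted(lista)
--     resultado = []
--     for i in range(n):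
--         copia = list(base)
--         copia.remove(lista[i - 1])
--         resultado.append(copia)
--     return resultado
-- ===== Notes on version B (the rewrite author's own statement) =====
-- stated objective: faster
-- what changed: Instead of materialising each rotation-minus-one-element and sorting it separately (n sorts of n-1 elements), B sorts the list once and, for each index, copies the sorted list and removes one occurrence of the skipped element lista[i-1].
import Mathlib
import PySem

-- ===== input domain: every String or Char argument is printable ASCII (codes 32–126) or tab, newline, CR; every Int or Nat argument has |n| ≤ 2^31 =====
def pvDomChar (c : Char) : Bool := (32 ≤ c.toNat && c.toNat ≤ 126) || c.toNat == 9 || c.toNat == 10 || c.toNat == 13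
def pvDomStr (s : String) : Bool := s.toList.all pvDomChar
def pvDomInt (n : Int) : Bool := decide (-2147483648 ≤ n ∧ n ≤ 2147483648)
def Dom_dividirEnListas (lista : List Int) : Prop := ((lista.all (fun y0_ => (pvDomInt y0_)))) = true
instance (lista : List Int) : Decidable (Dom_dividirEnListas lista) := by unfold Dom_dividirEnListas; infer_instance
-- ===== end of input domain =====

-- B sorts the list once and removes the skipped element from a copy of the sorted list,
-- instead of A's separate sort of each rotation-minus-last (asymptotically faster).

-- ===== PORT A =====
-- literal port of A: build each rotation minus its last element, then sort each.
-- (the pyGetD default 0 is never used: the index (i+j) % tam is always in range)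
def dividirEnListas (lista : List Int) : List (List Int) :=
  let tam : Int := lista.length
  let resultado : List (List Int) :=
    (PySem.List.pyRange 0 tam 1).foldl (fun res i =>
      let listaAux : List Int :=
        (PySem.List.pyRange 0 (tam - 1) 1).foldl (fun aux j =>
          aux ++ [PySem.List.pyGetD lista (PySem.Int.mod (i + j) tam) 0]) []
      res ++ [listaAux]) []
  resultado.map (fun l => PySem.List.sorted l (fun x => x) false)

-- ===== PORT B =====
-- literal port of Source B: sort once; per index remove one occurrence of lista[i-1].
-- (remove? never fails here — lista[i-1] is an element of the sorted copy; getD is dead code)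
def dividirEnListas_alt (lista : List Int) : List (List Int) :=
  let n : Int := lista.length
  let base : List Int := PySem.List.sorted lista (fun x => x) false
  (PySem.List.pyRange 0 n 1).foldl (fun res i =>
    let copia : List Int :=
      (PySem.List.remove? base (PySem.List.pyGetD lista (i - 1) 0)).getD base
    res ++ [copia]) []

-- ===== PRECONDITION & SPEC =====
def Spec_dividirEnListas (lista : List Int) (out : List (List Int)) : Prop := out = dividirEnListas_alt lista
instance (lista : List Int) (out : List (List Int)) : Decidable (Spec_dividirEnListas lista out) := by unfold Spec_dividirEnListas; infer_instance

-- ===== CLAIM (what is proved, stated in full; the proofs are below) =====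
def Claim_equal_dividirEnListas : Prop := ∀ (lista : List Int), Dom_dividirEnListas lista → Spec_dividirEnListas lista (dividirEnListas lista)

-- ===== LEMMAS AND PROOFS =====

lemma rot_map (lista : List Int) (i : Int) (h0 : 0 ≤ i) (h1 : i < (lista.length : Int)) :
    (PySem.List.pyRange 0 (lista.length : Int) 1).map
        (fun j => PySem.List.pyGetD lista (PySem.Int.mod (i + j) (lista.length : Int)) 0)
      = lista.drop i.toNat ++ lista.take i.toNat := by
  rw [← List.rotate_eq_drop_append_take (by omega)]
  apply List.ext_getElem
  · simp [PySem.List.length_pyRange_one]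
  · intro p hp1 hp2
    simp only [List.getElem_map, PySem.List.getElem_pyRange_one, List.getElem_rotate]
    have hlen : 0 < lista.length := by omega
    have hmodlt : (i.toNat + p) % lista.length < lista.length := Nat.mod_lt _ hlen
    have hidx : PySem.Int.mod (i + (0 + (p : Int))) (lista.length : Int)
        = ((i.toNat + p) % lista.length : Nat) := by
      have hi' : (i.toNat : Int) = i := Int.toNat_of_nonneg h0
      rw [PySem.Int.mod_eq_emod_of_pos (by omega)]
      push_cast [hi']
      ring_nf
    rw [hidx, PySem.List.pyGetD_natCast]
    rw [List.getD_eq_getElem _ _ (by omega)]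
    congr 1
    rw [Nat.add_comm]

lemma core (lista : List Int) (i : Int) (h0 : 0 ≤ i) (h1 : i < (lista.length : Int)) :
    PySem.List.sorted
        ((PySem.List.pyRange 0 ((lista.length : Int) - 1) 1).map
          (fun j => PySem.List.pyGetD lista (PySem.Int.mod (i + j) (lista.length : Int)) 0))
        (fun x => x) false
      = (PySem.List.remove? (PySem.List.sorted lista (fun x => x) false)
          (PySem.List.pyGetD lista (i - 1) 0)).getD
          (PySem.List.sorted lista (fun x => x) false) := by
  have hlen : 0 < lista.length := by omega
  set f : Int → Int := fun j => PySem.List.pyGetD lista (PySem.Int.mod (i + j) (lista.length : Int)) 0 with hf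
  set v : Int := PySem.List.pyGetD lista (i - 1) 0 with hv
  set Ai : List Int := (PySem.List.pyRange 0 ((lista.length : Int) - 1) 1).map f with hAi
  -- split the full range: full map = Ai ++ [f (len-1)]
  have hsplit : (PySem.List.pyRange 0 (lista.length : Int) 1).map f
      = Ai ++ [f ((lista.length : Int) - 1)] := by
    have h := PySem.List.pyRange_one_succ_right (a := 0) (b := (lista.length : Int) - 1) (by omega)
    rw [show ((lista.length : Int) - 1) + 1 = (lista.length : Int) by ring] at h
    rw [h, List.map_append, hAi]
    simp
  -- the last element of the rotation is v
  have hlast : f ((lista.length : Int) - 1) = v := by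
    rcases eq_or_lt_of_le h0 with hi0 | hi1
    · -- i = 0
      subst hi0
      have hmod : PySem.Int.mod (0 + ((lista.length : Int) - 1)) (lista.length : Int)
          = (lista.length : Int) - 1 := by
        rw [PySem.Int.mod_eq_emod_of_pos (by omega), zero_add]
        exact Int.emod_eq_of_lt (by omega) (by omega)
      rw [hf, hv]
      simp only [hmod]
      rw [show (0:Int) - 1 = -((1:Nat):Int) by simp]
      rw [PySem.List.pyGetD_eq_getElem lista 0 (by omega) (by omega)]
      rw [PySem.List.pyGetD_neg_natCast lista 1 0 (by omega) (by omega)]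
      congr 1
      omega
    · -- 1 ≤ i
      have hmod : PySem.Int.mod (i + ((lista.length : Int) - 1)) (lista.length : Int)
          = i - 1 := by
        rw [PySem.Int.mod_eq_emod_of_pos (by omega)]
        rw [show i + ((lista.length : Int) - 1) = (i - 1) + (lista.length : Int) * 1 by ring]
        rw [Int.add_mul_emod_self_left]
        exact Int.emod_eq_of_lt (by omega) (by omega)
      rw [hf, hv]
      simp only [hmod]
  -- permutation: lista ~ v :: Ai
  have hperm : lista.Perm (v :: Ai) := by
    have hr := rot_map lista i h0 h1
    rw [hsplit, hlast] at hr
    have hperm1 : (Ai ++ [v]).Perm lista := by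
      rw [hr]
      calc (lista.drop i.toNat ++ lista.take i.toNat).Perm
            (lista.take i.toNat ++ lista.drop i.toNat) := List.perm_append_comm
        _ = lista := List.take_append_drop _ _
    exact hperm1.symm.trans (List.perm_append_singleton _ _)
  -- v is in the sorted base list, so remove? succeeds
  have hvbase : v ∈ PySem.List.sorted lista (fun x => x) false :=
    (PySem.List.mem_sorted lista (fun x => x) false v).mpr
      (hperm.mem_iff.mpr (List.mem_cons_self))
  rw [PySem.List.remove?_eq_some_erase _ v hvbase, Option.getD_some]
  -- both sides are ≤-sorted rearrangements of lista minus one occurrence of v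
  have p1 : (PySem.List.sorted Ai (fun x => x) false).Perm Ai := PySem.List.sorted_perm Ai _ false
  have p2 : (lista.erase v).Perm Ai := by simpa using hperm.erase v
  have p3 : (((PySem.List.sorted lista (fun x => x) false)).erase v).Perm (lista.erase v) :=
    (PySem.List.sorted_perm lista _ false).erase v
  refine PySem.List.eq_of_perm_of_pairwise_le ((p1.trans p2.symm).trans p3.symm) ?_ ?_
  · simpa using PySem.List.sorted_pairwise Ai (fun x => x)
  · exact List.Pairwise.sublist List.erase_sublist
      (by simpa using PySem.List.sorted_pairwise lista (fun x => x))

-- ===== VERDICT (by name: the statement is the Claim_ definition above) =====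
theorem dividirEnListas_spec : Claim_equal_dividirEnListas := by
  intro lista _
  unfold Spec_dividirEnListas dividirEnListas dividirEnListas_alt
  simp only [PySem.List.foldl_append_singleton_eq_map, List.nil_append, List.map_map]
  apply List.map_congr_left
  intro i hi
  rw [PySem.List.mem_pyRange_one] at hi
  simp only [Function.comp]
  exact core lista i hi.1 hi.2
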